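-- pv_equiv track=rewrite | github.com/RideGreg/LeetCode | Python/longest-uncommon-subsequence-ii.py | findLUSlength_bookshadow
-- ===== SOURCE A (Python) =====
-- def findLUSlength_bookshadow(strs): # USE THIS
--     def isSubsequence(a, b):
--         m, n, pa, pb = len(a), len(b), 0, 0
--         while pa < m and pb < n:
--             if a[pa] == b[pb]:
--                 pa += 1
--             pb += 1
--         return pa == m
--
--     from collections import Counter
--     cnt = Counter(strs)
--     slist = sorted(set(strs), key=len, reverse=True)
--     for i, s in enumerate(slist):
--         if cnt[s] == 1 and not any(isSubsequence(s, p) for p in slist[:i]):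
--             return len(s)
--     return -1
-- ===== SOURCE B (Python) =====
-- def findLUSlength_bookshadow(strs):
--     # flat all-pairs scan tracking the max; no Counter, no sorting
--     def is_sub(a, b):
--         it = iter(b)
--         return all(c in it for c in a)
--     res = -1
--     for i, s in enumerate(strs):
--         if all(j == i or not is_sub(s, t) for j, t in enumerate(strs)):
--             res = max(res, len(s))
--     return res
-- ===== Notes on version B (the rewrite author's own statement) =====
-- stated objective: simpler
-- what changed: B drops A's Counter and length-descending sort of the dedup set with early return, and instead does one flat all-pairs subsequence scan over the original list, keeping a running maximum length (duplicates rule themselves out since a string is a subsequence of its twin); the subsequence helper is the idiomatic iterator scan instead of A's two-pointer while loop.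
import Mathlib
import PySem

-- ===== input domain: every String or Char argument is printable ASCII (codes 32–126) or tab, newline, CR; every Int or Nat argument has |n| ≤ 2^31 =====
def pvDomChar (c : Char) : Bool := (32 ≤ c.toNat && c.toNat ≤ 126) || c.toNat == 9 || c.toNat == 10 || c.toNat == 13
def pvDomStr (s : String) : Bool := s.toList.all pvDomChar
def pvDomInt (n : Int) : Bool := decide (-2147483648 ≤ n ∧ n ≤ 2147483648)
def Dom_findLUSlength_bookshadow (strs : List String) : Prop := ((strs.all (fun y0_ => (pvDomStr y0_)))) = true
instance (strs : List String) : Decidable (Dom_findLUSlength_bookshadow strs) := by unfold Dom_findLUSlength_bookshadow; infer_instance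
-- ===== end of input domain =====

-- B is a simpler re-implementation: no Counter and no sorting, just a flat all-pairs
-- subsequence scan that tracks the maximum length; same return value everywhere.

-- ===== PORT A =====
-- the two-pointer while loop of A's isSubsequence; returns the final pa
def pvIsSubLoop (a b : List Char) (pa pb : Nat) : Nat :=
  if h : pa < a.length ∧ pb < b.length then
    pvIsSubLoop a b (if a[pa]'h.1 = b[pb]'h.2 then pa + 1 else pa) (pb + 1)
  else pa
termination_by b.length - pb

def pvIsSubsequence (a b : String) : Bool :=
  pvIsSubLoop a.toList b.toList 0 0 == a.toList.length

-- A's for-loop with early return over enumerate(slist)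
def pvAScan (cnt : PySem.Dict String Int) (slist : List String) :
    List (Int × String) → Int
  | [] => -1
  | (i, s) :: rest =>
    if cnt.getD s 0 == 1 &&
        !((PySem.List.slice slist none (some i)).any (fun p => pvIsSubsequence s p)) then
      PySem.Str.len s
    else pvAScan cnt slist rest

def findLUSlength_bookshadow (strs : List String) : Int :=
  let cnt := PySem.Dict.counter strs
  let slist := PySem.List.sorted (PySem.Set.ofList strs) (fun s => PySem.Str.len s) true
  pvAScan cnt slist (PySem.List.enumerate slist 0)

-- ===== PORT B =====
-- B's is_sub: the greedy iterator scan `it = iter(b); all(c in it for c in a)`, exact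
def pvIsSub : List Char → List Char → Bool
  | [], _ => true
  | _ :: _, [] => false
  | a :: as, b :: bs => if a = b then pvIsSub as bs else pvIsSub (a :: as) bs

def findLUSlength_bookshadow_alt (strs : List String) : Int :=
  (PySem.List.enumerate strs 0).foldl
    (fun res p =>
      if (PySem.List.enumerate strs 0).all
          (fun q => q.1 == p.1 || !(pvIsSub p.2.toList q.2.toList)) then
        max res (PySem.Str.len p.2)
      else res)
    (-1)

-- ===== PRECONDITION & SPEC =====
def Spec_findLUSlength_bookshadow (strs : List String) (out : Int) : Prop := out = findLUSlength_bookshadow_alt strs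
instance (strs : List String) (out : Int) : Decidable (Spec_findLUSlength_bookshadow strs out) := by unfold Spec_findLUSlength_bookshadow; infer_instance

-- ===== CLAIM (what is proved, stated in full; the proofs are below) =====
def Claim_equal_findLUSlength_bookshadow : Prop := ∀ (strs : List String), Dom_findLUSlength_bookshadow strs → Spec_findLUSlength_bookshadow strs (findLUSlength_bookshadow strs)

-- ===== LEMMAS AND PROOFS =====

theorem pvIsSubLoop_eq_aux (a b : List Char) (n : Nat) :
    ∀ pa pb, b.length - pb = n → pa ≤ a.length →
    ((pvIsSubLoop a b pa pb = a.length) ↔ pvIsSub (a.drop pa) (b.drop pb) = true) := by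
  induction n with
  | zero =>
    intro pa pb hn hpa
    have hpb : b.length ≤ pb := by omega
    rw [pvIsSubLoop, dif_neg (by omega)]
    rw [List.drop_eq_nil_of_le hpb]
    rcases Nat.lt_or_ge pa a.length with hlt | hge
    · have hne : a.drop pa ≠ [] := by
        simp [List.drop_eq_nil_iff]; omega
      obtain ⟨c, cs, hc⟩ := List.exists_cons_of_ne_nil hne
      rw [hc]
      simp [pvIsSub]; omega
    · have hpae : pa = a.length := by omega
      subst hpae
      simp [List.drop_length, pvIsSub]
  | succ n ih =>
    intro pa pb hn hpa
    by_cases h : pa < a.length ∧ pb < b.length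
    · rw [pvIsSubLoop, dif_pos h]
      have hb : b.drop pb = b[pb] :: b.drop (pb + 1) := List.drop_eq_getElem_cons h.2
      have ha : a.drop pa = a[pa] :: a.drop (pa + 1) := List.drop_eq_getElem_cons h.1
      by_cases hc : a[pa]'h.1 = b[pb]'h.2
      · rw [if_pos hc, ih (pa + 1) (pb + 1) (by omega) (by omega)]
        rw [ha, hb, pvIsSub, if_pos hc]
      · rw [if_neg hc, ih pa (pb + 1) (by omega) hpa]
        rw [ha, hb, pvIsSub, if_neg hc, ← ha]
    · rw [pvIsSubLoop, dif_neg h]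
      have hpb : pb < b.length := by omega
      have hpae : pa = a.length := by omega
      subst hpae
      simp [List.drop_length, pvIsSub]

theorem pvIsSubsequence_eq (a b : String) :
    pvIsSubsequence a b = pvIsSub a.toList b.toList := by
  have h := pvIsSubLoop_eq_aux a.toList b.toList (b.toList.length) 0 0 (by omega) (by omega)
  simp only [List.drop_zero] at h
  rw [pvIsSubsequence]
  cases hs : pvIsSub a.toList b.toList
  · simp [hs] at h
    simp [h]
  · simp [hs] at h
    simp [h]

theorem pvIsSub_refl (l : List Char) : pvIsSub l l = true := by
  induction l with
  | nil => rfl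
  | cons x xs ih => simp [pvIsSub, ih]

theorem pvIsSub_length {a b : List Char} (h : pvIsSub a b = true) :
    a.length ≤ b.length := by
  induction b generalizing a with
  | nil => cases a with
    | nil => simp
    | cons x xs => simp [pvIsSub] at h
  | cons y ys ih =>
    cases a with
    | nil => simp
    | cons x xs =>
      rw [pvIsSub] at h
      by_cases hc : x = y
      · rw [if_pos hc] at h
        have := ih h; simp; omega
      · rw [if_neg hc] at h
        have := ih h; simp at this ⊢; omega

theorem pvIsSub_eq_of_length {a b : List Char} (h : pvIsSub a b = true)
    (hl : b.length ≤ a.length) : a = b := by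
  induction b generalizing a with
  | nil => cases a with
    | nil => rfl
    | cons x xs => simp [pvIsSub] at h
  | cons y ys ih =>
    cases a with
    | nil => simp at hl
    | cons x xs =>
      rw [pvIsSub] at h
      by_cases hc : x = y
      · rw [if_pos hc] at h
        have := ih h (by simp at hl ⊢; omega)
        rw [hc, this]
      · rw [if_neg hc] at h
        have := pvIsSub_length h
        simp at this hl; omega
theorem pv_two_le_count {l : List String} {x : String} {i j : Nat}
    (hi : i < l.length) (hj : j < l.length) (hij : i ≠ j)
    (hx : l[i] = x) (hy : l[j] = x) : 2 ≤ l.count x := by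
  rw [← List.duplicate_iff_two_le_count, List.duplicate_iff_exists_distinct_get]
  rcases Nat.lt_or_ge i j with h | h
  · exact ⟨⟨i, hi⟩, ⟨j, hj⟩, by simpa using h, by simp [hx], by simp [hy]⟩
  · have hji : j < i := by omega
    exact ⟨⟨j, hj⟩, ⟨i, hi⟩, by simpa using hji, by simp [hy], by simp [hx]⟩

theorem pv_exists_other_index {l : List String} {x : String} (h : 2 ≤ l.count x)
    (k : Nat) : ∃ j, ∃ _ : j < l.length, j ≠ k ∧ l[j] = x := by
  rw [← List.duplicate_iff_two_le_count, List.duplicate_iff_exists_distinct_get] at h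
  obtain ⟨n, m, hnm, hxn, hxm⟩ := h
  have hnm' : (n : Nat) ≠ (m : Nat) := by
    intro he; exact absurd (Fin.val_eq_val n m |>.mp he) (by omega)
  by_cases hk : (n : Nat) = k
  · refine ⟨m, m.isLt, by omega, ?_⟩
    rw [← List.get_eq_getElem, ← hxm]
  · refine ⟨n, n.isLt, hk, ?_⟩
    rw [← List.get_eq_getElem, ← hxn]

def pvGood (strs : List String) (s : String) : Bool :=
  (strs.count s == 1) &&
    strs.all (fun t => t == s || !(pvIsSub s.toList t.toList))

-- propositional characterisation of pvGood
theorem pvGood_iff (strs : List String) (s : String) :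
    pvGood strs s = true ↔
      strs.count s = 1 ∧ ∀ t ∈ strs, t = s ∨ pvIsSub s.toList t.toList = false := by
  rw [pvGood, Bool.and_eq_true, List.all_eq_true]
  simp only [beq_iff_eq, Bool.or_eq_true, Bool.not_eq_true']

theorem pvCondB_eq (strs : List String) (k : Nat) (hk : k < strs.length) :
    ((PySem.List.enumerate strs 0).all
      (fun q => q.1 == ((k : Nat) : Int) || !(pvIsSub (strs[k]).toList q.2.toList)))
      = pvGood strs strs[k] := by
  rw [Bool.eq_iff_iff, pvGood_iff]
  rw [List.all_eq_true]
  constructor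
  · intro H
    have H' : ∀ j, (hj : j < strs.length) → j = k ∨ pvIsSub (strs[k]).toList (strs[j]).toList = false := by
      intro j hj
      have := H ((0 + (j : Int), strs[j])) (by rw [PySem.List.mem_enumerate_iff]; exact ⟨j, hj, rfl⟩)
      simp at this
      rcases this with h | h
      · left; omega
      · right; simpa using h
    constructor
    · -- count = 1
      have h1 : 0 < strs.count strs[k] := List.count_pos_iff.mpr (List.getElem_mem hk)
      by_contra hne
      have h2 : 2 ≤ strs.count strs[k] := by omega
      obtain ⟨j, hj, hjk, hjx⟩ := pv_exists_other_index h2 k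
      rcases H' j hj with h | h
      · exact hjk h
      · rw [hjx] at h
        rw [pvIsSub_refl] at h
        exact absurd h (by simp)
    · intro t ht
      obtain ⟨j, hj, hjt⟩ := List.mem_iff_getElem.mp ht
      rcases H' j hj with h | h
      · left; subst h; exact hjt.symm
      · right; rw [← hjt]; exact h
  · rintro ⟨hcnt, hall⟩ q hq
    rw [PySem.List.mem_enumerate_iff] at hq
    obtain ⟨j, hj, rfl⟩ := hq
    simp only [Bool.or_eq_true, beq_iff_eq, Bool.not_eq_true']
    by_cases hjk : j = k
    · left; rw [hjk]; simp
    · right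
      rcases hall strs[j] (List.getElem_mem hj) with h | h
      · exfalso
        have := pv_two_le_count hj hk hjk h rfl
        omega
      · exact h

def pvScanS (strs : List String) : List String → Int
  | [] => -1
  | s :: rest => if pvGood strs s then PySem.Str.len s else pvScanS strs rest

def pvMx (strs : List String) (l : List String) (init : Int) : Int :=
  l.foldl (fun r s => if pvGood strs s then max r (PySem.Str.len s) else r) init

theorem pvB_eq_mx (strs : List String) :
    findLUSlength_bookshadow_alt strs = pvMx strs strs (-1) := by
  rw [findLUSlength_bookshadow_alt, pvMx]
  have h1 := PySem.List.foldl_congr_mem (PySem.List.enumerate strs 0)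
    (fun res p => if (PySem.List.enumerate strs 0).all
        (fun q => q.1 == p.1 || !(pvIsSub p.2.toList q.2.toList)) then
      max res (PySem.Str.len p.2) else res)
    (fun res p => if pvGood strs p.2 then max res (PySem.Str.len p.2) else res)
    (-1) ?_
  · rw [h1]
    have h2 : List.foldl (fun r s => if pvGood strs s then max r (PySem.Str.len s) else r) (-1) strs
        = List.foldl (fun r s => if pvGood strs s then max r (PySem.Str.len s) else r) (-1)
          ((PySem.List.enumerate strs 0).map (fun p => p.2)) := by
      rw [PySem.List.map_snd_enumerate]
    rw [h2, List.foldl_map]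
  · intro acc p hp
    rw [PySem.List.mem_enumerate_iff] at hp
    obtain ⟨j, hj, rfl⟩ := hp
    simp only [zero_add]
    rw [pvCondB_eq strs j hj]

theorem pvCondA_gen (strs L : List String)
    (hmem : ∀ s, s ∈ L ↔ s ∈ strs) (hnd : L.Nodup)
    (hpair : L.Pairwise (fun a b => PySem.Str.len b ≤ PySem.Str.len a))
    (k : Nat) (hk : k < L.length) :
    ((PySem.Dict.counter strs).getD L[k] 0 == 1 &&
      !((PySem.List.slice L none (some ((k : Nat) : Int))).any
         (fun p => pvIsSubsequence L[k] p)))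
      = pvGood strs L[k] := by
  rw [Bool.eq_iff_iff, pvGood_iff]
  rw [PySem.Dict.getD_counter, PySem.List.slice_to_natCast]
  simp only [Bool.and_eq_true, beq_iff_eq, Bool.not_eq_true', List.any_eq_false,
    Nat.cast_eq_one, Bool.not_eq_true]
  constructor
  · rintro ⟨hc, hpre⟩
    refine ⟨hc, ?_⟩
    intro t ht
    by_cases hts : t = L[k]
    · exact .inl hts
    · right
      by_contra hsub
      rw [Bool.not_eq_false] at hsub
      have hlen : (L[k]).toList.length ≤ t.toList.length := pvIsSub_length hsub
      have hlt : (L[k]).toList.length < t.toList.length := by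
        rcases Nat.lt_or_ge (L[k]).toList.length t.toList.length with h | h
        · exact h
        · exact absurd (String.toList_inj.mp (pvIsSub_eq_of_length hsub h)) (fun he => hts (he ▸ rfl))
      obtain ⟨j, hj, hjt⟩ := List.mem_iff_getElem.mp ((hmem t).mpr ht)
      have hjk : j ≠ k := fun he => hts (by subst he; exact hjt.symm)
      have hjlt : j < k := by
        by_contra hge
        have hkj : k < j := by omega
        have hlen2 := List.pairwise_iff_getElem.mp hpair k j hk hj hkj
        rw [hjt, PySem.Str.len_eq, PySem.Str.len_eq] at hlen2
        have hle : t.toList.length ≤ L[k].toList.length := by exact_mod_cast hlen2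
        omega
      have htin : t ∈ L.take k := by
        rw [List.mem_iff_getElem]
        exact ⟨j, by simp [List.length_take]; omega, by rw [List.getElem_take]; exact hjt⟩
      have := hpre t htin
      rw [pvIsSubsequence_eq] at this
      rw [this] at hsub
      exact absurd hsub (by simp)
  · rintro ⟨hc, hall⟩
    refine ⟨hc, ?_⟩
    intro p hp
    rw [pvIsSubsequence_eq]
    obtain ⟨j, hj', hjp⟩ := List.mem_iff_getElem.mp hp
    have hjlen : j < L.length := by
      have := hj'; simp [List.length_take] at this; omega
    have hjk : j < k := by
      have := hj'; simp [List.length_take] at this; omega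
    have hpL : p = L[j] := by rw [← hjp, List.getElem_take]
    have hps : p ≠ L[k] := by
      rw [hpL]
      intro he
      exact absurd ((hnd.getElem_inj_iff).mp he) (by omega)
    rcases hall p ((hmem p).mp (List.mem_of_mem_take hp)) with h | h
    · exact absurd h hps
    · simp [h]

theorem pvAScan_congr (cnt : PySem.Dict String Int) (slist strs : List String) :
    ∀ l : List (Int × String),
      (∀ p ∈ l, (cnt.getD p.2 0 == 1 &&
          !((PySem.List.slice slist none (some p.1)).any (fun q => pvIsSubsequence p.2 q)))
          = pvGood strs p.2) →
      pvAScan cnt slist l = pvScanS strs (l.map (·.2)) := by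
  intro l
  induction l with
  | nil => intro _; rfl
  | cons p rest ih =>
    intro h
    obtain ⟨i, s⟩ := p
    have hh := h (i, s) (by simp)
    rw [pvAScan, List.map_cons, pvScanS]
    simp only at hh
    rw [hh]
    by_cases hg : pvGood strs s = true
    · rw [if_pos hg, if_pos hg]
    · rw [if_neg hg, if_neg hg]
      exact ih (fun q hq => h q (by simp [hq]))

theorem pvA_eq_scanS (strs : List String) :
    findLUSlength_bookshadow strs
      = pvScanS strs (PySem.List.sorted (PySem.Set.ofList strs) (fun s => PySem.Str.len s) true) := by
  rw [findLUSlength_bookshadow]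
  set L := PySem.List.sorted (PySem.Set.ofList strs) (fun s => PySem.Str.len s) true with hL
  have hmem : ∀ s, s ∈ L ↔ s ∈ strs := by
    intro s
    rw [hL, PySem.List.mem_sorted, PySem.Set.mem_ofList]
  have hnd : L.Nodup :=
    (PySem.List.sorted_perm (PySem.Set.ofList strs) _ true).nodup_iff.mpr
      (PySem.Set.nodup_ofList strs)
  have hpair : L.Pairwise (fun a b => PySem.Str.len b ≤ PySem.Str.len a) :=
    PySem.List.sorted_pairwise_rev (PySem.Set.ofList strs) _
  have := pvAScan_congr (PySem.Dict.counter strs) L strs (PySem.List.enumerate L 0) ?_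
  · rw [this, PySem.List.map_snd_enumerate]
  · intro p hp
    rw [PySem.List.mem_enumerate_iff] at hp
    obtain ⟨k, hk, rfl⟩ := hp
    simp only [zero_add]
    exact pvCondA_gen strs L hmem hnd hpair k hk

theorem pvMx_cons (strs : List String) (t : String) (rest : List String) (init : Int) :
    pvMx strs (t :: rest) init
      = pvMx strs rest (if pvGood strs t then max init (PySem.Str.len t) else init) := rfl

theorem pvMx_init_le (strs l : List String) (init : Int) : init ≤ pvMx strs l init := by
  induction l generalizing init with
  | nil => simp [pvMx]
  | cons t rest ih =>
    rw [pvMx_cons]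
    by_cases hgt : pvGood strs t
    · rw [if_pos hgt]
      exact le_trans (le_max_left _ _) (ih (max init (PySem.Str.len t)))
    · rw [if_neg hgt]
      exact ih init

theorem pvMx_ge (strs l : List String) (init : Int) {s : String} (hs : s ∈ l)
    (hg : pvGood strs s = true) : PySem.Str.len s ≤ pvMx strs l init := by
  induction l generalizing init with
  | nil => simp at hs
  | cons t rest ih =>
    rw [pvMx_cons]
    rcases List.mem_cons.mp hs with he | hm
    · subst he
      rw [if_pos hg]
      exact le_trans (le_max_right _ _) (pvMx_init_le strs rest _)
    · by_cases hgt : pvGood strs t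
      · rw [if_pos hgt]; exact ih _ hm
      · rw [if_neg hgt]; exact ih _ hm

theorem pvMx_cases (strs l : List String) (init : Int) :
    pvMx strs l init = init ∨ ∃ s ∈ l, pvGood strs s = true ∧ pvMx strs l init = PySem.Str.len s := by
  induction l generalizing init with
  | nil => left; rfl
  | cons t rest ih =>
    rw [pvMx_cons]
    by_cases hgt : pvGood strs t
    · rw [if_pos hgt]
      rcases ih (max init (PySem.Str.len t)) with h | ⟨s, hs, hg, h⟩
      · rcases max_choice init (PySem.Str.len t) with hm | hm
        · left; rw [h, hm]
        · right; exact ⟨t, by simp, hgt, by rw [h, hm]⟩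
      · right; exact ⟨s, by simp [hs], hg, h⟩
    · rw [if_neg hgt]
      rcases ih init with h | ⟨s, hs, hg, h⟩
      · left; exact h
      · right; exact ⟨s, by simp [hs], hg, h⟩

theorem pvScanS_cases (strs l : List String) :
    pvScanS strs l = -1 ∨ ∃ s ∈ l, pvGood strs s = true ∧ pvScanS strs l = PySem.Str.len s := by
  induction l with
  | nil => left; rfl
  | cons t rest ih =>
    rw [pvScanS]
    by_cases hgt : pvGood strs t = true
    · right; exact ⟨t, by simp, hgt, by rw [if_pos hgt]⟩
    · rw [if_neg hgt]
      rcases ih with h | ⟨s, hs, hg, h⟩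
      · left; exact h
      · right; exact ⟨s, by simp [hs], hg, h⟩

theorem pvScanS_ge (strs : List String) {l : List String}
    (hp : l.Pairwise (fun a b => PySem.Str.len b ≤ PySem.Str.len a)) {s : String}
    (hs : s ∈ l) (hg : pvGood strs s = true) : PySem.Str.len s ≤ pvScanS strs l := by
  induction l with
  | nil => simp at hs
  | cons t rest ih =>
    rw [pvScanS]
    rcases List.mem_cons.mp hs with he | hm
    · subst he
      rw [if_pos hg]
    · by_cases hgt : pvGood strs t = true
      · rw [if_pos hgt]
        exact (List.pairwise_cons.mp hp).1 s hm
      · rw [if_neg hgt]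
        exact ih (List.pairwise_cons.mp hp).2 hm

theorem pvScanS_neg1_le (strs l : List String) : -1 ≤ pvScanS strs l := by
  induction l with
  | nil => simp [pvScanS]
  | cons t rest ih =>
    rw [pvScanS]
    by_cases hgt : pvGood strs t = true
    · rw [if_pos hgt, PySem.Str.len_eq]; omega
    · rw [if_neg hgt]; exact ih

theorem pvA_eq_B (strs : List String) :
    findLUSlength_bookshadow strs = findLUSlength_bookshadow_alt strs := by
  rw [pvA_eq_scanS, pvB_eq_mx]
  set L := PySem.List.sorted (PySem.Set.ofList strs) (fun s => PySem.Str.len s) true with hL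
  have hmem : ∀ s, s ∈ L ↔ s ∈ strs := by
    intro s
    rw [hL, PySem.List.mem_sorted, PySem.Set.mem_ofList]
  have hpair : L.Pairwise (fun a b => PySem.Str.len b ≤ PySem.Str.len a) :=
    PySem.List.sorted_pairwise_rev (PySem.Set.ofList strs) _
  apply le_antisymm
  · rcases pvScanS_cases strs L with h | ⟨s, hs, hg, h⟩
    · rw [h]; exact pvMx_init_le strs strs (-1)
    · rw [h]; exact pvMx_ge strs strs (-1) ((hmem s).mp hs) hg
  · rcases pvMx_cases strs strs (-1) with h | ⟨s, hs, hg, h⟩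
    · rw [h]; exact pvScanS_neg1_le strs L
    · rw [h]; exact pvScanS_ge strs hpair ((hmem s).mpr hs) hg

-- ===== VERDICT (by name: the statement is the Claim_ definition above) =====
theorem findLUSlength_bookshadow_spec : Claim_equal_findLUSlength_bookshadow := by
  intro strs _
  unfold Spec_findLUSlength_bookshadow
  exact pvA_eq_B strs
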